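-- pv_equiv track=rewrite | github.com/pypi-data/pypi-mirror-380 | packages/vnnum2word/vnnum2word-0.2.0.tar.gz/vnnum2word-0.2.0/vnnum2word/main.py | _convert_nn
-- ===== SOURCE A (Python) =====
-- to_19 = (u'không', u'một', u'hai', u'ba', u'bốn', u'năm', u'sáu',
--          u'bảy', u'tám', u'chín', u'mười', u'mười một', u'mười hai',
--          u'mười ba', u'mười bốn', u'mười lăm', u'mười sáu', u'mười bảy',
--          u'mười tám', u'mười chín')
--
-- tens = (u'hai mươi', u'ba mươi', u'bốn mươi', u'năm mươi',
--         u'sáu mươi', u'bảy mươi', u'tám mươi', u'chín mươi')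
--
-- def _convert_nn(val):
--     if val < 20:
--         return to_19[val]
--     for (dcap, dval) in ((k, 20 + (10 * v)) for (v, k) in enumerate(tens)):
--         if dval + 10 > val:
--             if val % 10:
--                 a = u'lăm'
--                 if to_19[val % 10] == u'một':
--                     a = u'mốt'
--                 else:
--                     a = to_19[val % 10]
--                 if to_19[val % 10] == u'năm':
--                     a = u'lăm'
--                 return dcap + ' ' + a
--             return dcap
-- ===== SOURCE B (Python) =====
-- to_19 = (u'không', u'một', u'hai', u'ba', u'bốn', u'năm', u'sáu',
--          u'bảy', u'tám', u'chín', u'mười', u'mười một', u'mười hai',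
--          u'mười ba', u'mười bốn', u'mười lăm', u'mười sáu', u'mười bảy',
--          u'mười tám', u'mười chín')
--
-- tens = (u'hai mươi', u'ba mươi', u'bốn mươi', u'năm mươi',
--         u'sáu mươi', u'bảy mươi', u'tám mươi', u'chín mươi')
--
--
-- def _convert_nn(val):
--     if val < 20:
--         return to_19[val]
--     ten_word = tens[val // 10 - 2]
--     u = val % 10
--     if u == 0:
--         return ten_word
--     unit = u'mốt' if u == 1 else (u'lăm' if u == 5 else to_19[u])
--     return ten_word + ' ' + unit
-- ===== Notes on version B (the rewrite author's own statement) =====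
-- stated objective: simpler
-- what changed: B replaces A's enumerate-and-scan over the tens tuple (with its redundant unit-word reassignment chain) by direct arithmetic indexing tens[val//10-2] and a single conditional expression for the unit word.
-- outside the precondition, e.g. on _convert_nn(100): A returns None, B raises IndexError
import Mathlib
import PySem

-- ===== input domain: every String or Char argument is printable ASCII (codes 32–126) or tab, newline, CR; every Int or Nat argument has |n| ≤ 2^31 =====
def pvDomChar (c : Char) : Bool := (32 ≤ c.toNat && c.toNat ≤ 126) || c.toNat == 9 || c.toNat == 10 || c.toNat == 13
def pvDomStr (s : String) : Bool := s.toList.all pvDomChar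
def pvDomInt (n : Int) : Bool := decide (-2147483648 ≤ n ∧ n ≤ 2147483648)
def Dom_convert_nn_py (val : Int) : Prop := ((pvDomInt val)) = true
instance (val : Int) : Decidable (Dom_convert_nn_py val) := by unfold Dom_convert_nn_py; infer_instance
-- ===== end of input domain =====

-- B replaces A's scan over the tens tuple by direct arithmetic indexing (simpler; return value only).

-- ===== PORT A =====
def pvTo19 : List String :=
  ["không", "một", "hai", "ba", "bốn", "năm", "sáu",
   "bảy", "tám", "chín", "mười", "mười một", "mười hai",
   "mười ba", "mười bốn", "mười lăm", "mười sáu", "mười bảy",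
   "mười tám", "mười chín"]

def pvTens : List String :=
  ["hai mươi", "ba mươi", "bốn mươi", "năm mươi",
   "sáu mươi", "bảy mươi", "tám mươi", "chín mươi"]

-- the for-loop over ((k, 20+10*v) for (v,k) in enumerate(tens)); none = the implicit fall-through None
def pvLoopA (val : Int) : List (String × Int) → Option String
  | [] => none
  | (dcap, dval) :: rest =>
    if dval + 10 > val then
      if PySem.Int.mod val 10 ≠ 0 then
        let a : String := "lăm"
        let a : String :=
          if (PySem.List.pyGet? pvTo19 (PySem.Int.mod val 10)).getD "" = "một" then "mốt"
          else (PySem.List.pyGet? pvTo19 (PySem.Int.mod val 10)).getD ""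
        let a : String :=
          if (PySem.List.pyGet? pvTo19 (PySem.Int.mod val 10)).getD "" = "năm" then "lăm" else a
        some (dcap ++ " " ++ a)
      else some dcap
    else pvLoopA val rest

def convert_nn_py (val : Int) : String :=
  if val < 20 then (PySem.List.pyGet? pvTo19 val).getD ""
  else
    (pvLoopA val ((PySem.List.enumerate pvTens).map (fun p => (p.2, 20 + 10 * p.1)))).getD ""

-- ===== PORT B =====
def convert_nn_py_alt (val : Int) : String :=
  if val < 20 then (PySem.List.pyGet? pvTo19 val).getD ""
  else
    let tenWord := (PySem.List.pyGet? pvTens (PySem.Int.floordiv val 10 - 2)).getD ""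
    let u := PySem.Int.mod val 10
    if u = 0 then tenWord
    else
      let unit := if u = 1 then "mốt" else if u = 5 then "lăm"
                  else (PySem.List.pyGet? pvTo19 u).getD ""
      tenWord ++ " " ++ unit

-- ===== PRECONDITION & SPEC =====
-- Pre_ excludes inputs whose negative index falls below -len(to_19), where A raises IndexError,
-- and val ≥ 100, where A falls through the loop and returns None, which is not a value of the
-- declared str type (B raises IndexError there).
def Pre_convert_nn_py (val : Int) : Prop := -20 ≤ val ∧ val < 100
instance (val : Int) : Decidable (Pre_convert_nn_py val) := by unfold Pre_convert_nn_py; infer_instance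
def pvWitness_convert_nn_py : Int := (42)

def Spec_convert_nn_py (val : Int) (out : String) : Prop := out = convert_nn_py_alt val
instance (val : Int) (out : String) : Decidable (Spec_convert_nn_py val out) := by unfold Spec_convert_nn_py; infer_instance

-- ===== CLAIM (what is proved, stated in full; the proofs are below) =====
def Claim_equal_convert_nn_py : Prop := ∀ (val : Int), Dom_convert_nn_py val → Pre_convert_nn_py val → Spec_convert_nn_py val (convert_nn_py val)

-- ===== LEMMAS AND PROOFS =====

-- ===== VERDICT (by name: the statement is the Claim_ definition above) =====
theorem convert_nn_py_spec : Claim_equal_convert_nn_py := by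
  intro val _ hpre
  unfold Spec_convert_nn_py
  obtain ⟨h1, h2⟩ := hpre
  interval_cases val <;> decide
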